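-- pv_equiv track=rewrite | github.com/saypinkx/algoritms4.0 | Razminka/E.py | prefix2
-- ===== SOURCE A (Python) =====
-- def prefix2(n, a):
--     result = []
--     prefix_sum = []
--     summa = 0
--     prefix_sum.append(summa)
--     for j in range(n):
--         summa += a[j]
--         prefix_sum.append(summa)
--     for i in range(n):
--         sum1 = prefix_sum[n] - prefix_sum[i] - a[i] * (n - i) + a[i] * i - prefix_sum[i]
--         result.append(sum1)
--     return result
-- ===== SOURCE B (Python) =====
-- def prefix2(n, a):
--     result = []
--     for i in range(n):
--         s = 0
--         for j in range(n):
--             s += (a[j] - a[i]) if j >= i else (a[i] - a[j])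
--         result.append(s)
--     return result
-- ===== Notes on version B (the rewrite author's own statement) =====
-- stated objective: alternative
-- what changed: Replaces the prefix-sum table and indexed formula with a direct nested double loop that sums the signed distance of every element to a[i].
import Mathlib
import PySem

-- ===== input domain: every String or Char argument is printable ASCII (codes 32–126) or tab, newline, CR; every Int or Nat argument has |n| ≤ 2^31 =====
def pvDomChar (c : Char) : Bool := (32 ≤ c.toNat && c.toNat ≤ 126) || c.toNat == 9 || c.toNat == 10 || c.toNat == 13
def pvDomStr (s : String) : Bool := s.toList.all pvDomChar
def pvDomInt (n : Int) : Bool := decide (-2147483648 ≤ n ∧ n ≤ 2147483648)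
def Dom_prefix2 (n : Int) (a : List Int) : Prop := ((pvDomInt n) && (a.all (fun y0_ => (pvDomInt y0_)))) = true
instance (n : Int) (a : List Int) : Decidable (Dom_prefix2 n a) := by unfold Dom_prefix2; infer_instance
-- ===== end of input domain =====

-- B replaces A's prefix-sum table by a direct nested double loop over signed distances
-- (alternative decomposition, not faster). Return-value equivalence only; neither mutates.

-- ===== PORT A =====
def prefix2 (n : Int) (a : List Int) : List Int :=
  let ps := (PySem.List.pyRange 0 n).foldl
      (fun (st : List Int × Int) j =>
        (st.1 ++ [st.2 + PySem.List.pyGetD a j 0], st.2 + PySem.List.pyGetD a j 0)) ([0], 0)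
  (PySem.List.pyRange 0 n).foldl
    (fun res i => res ++ [PySem.List.pyGetD ps.1 n 0 - PySem.List.pyGetD ps.1 i 0
        - PySem.List.pyGetD a i 0 * (n - i) + PySem.List.pyGetD a i 0 * i
        - PySem.List.pyGetD ps.1 i 0]) []

-- ===== PORT B =====
def prefix2_alt (n : Int) (a : List Int) : List Int :=
  (PySem.List.pyRange 0 n).foldl
    (fun res i => res ++ [(PySem.List.pyRange 0 n).foldl
        (fun s j => s + (if j ≥ i then PySem.List.pyGetD a j 0 - PySem.List.pyGetD a i 0
                         else PySem.List.pyGetD a i 0 - PySem.List.pyGetD a j 0)) 0]) []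

-- ===== PRECONDITION & SPEC =====
-- Pre_ excludes exactly the inputs where the Python A raises IndexError: n beyond len(a).
def Pre_prefix2 (n : Int) (a : List Int) : Prop := n ≤ (a.length : Int)
instance (n : Int) (a : List Int) : Decidable (Pre_prefix2 n a) := by unfold Pre_prefix2; infer_instance
def pvWitness_prefix2 : Int × List Int := (3, [5, -2, 7])

def Spec_prefix2 (n : Int) (a : List Int) (out : List Int) : Prop := out = prefix2_alt n a
instance (n : Int) (a : List Int) (out : List Int) : Decidable (Spec_prefix2 n a out) := by unfold Spec_prefix2; infer_instance

-- ===== CLAIM (what is proved, stated in full; the proofs are below) =====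
def Claim_equal_prefix2 : Prop := ∀ (n : Int) (a : List Int), Dom_prefix2 n a → Pre_prefix2 n a → Spec_prefix2 n a (prefix2 n a)

-- ===== LEMMAS AND PROOFS =====

-- prefix sums of the first k getD-values of a
def pvP (a : List Int) (k : Nat) : Int := ((List.range k).map (fun j => a.getD j 0)).sum

theorem pvP_succ (a : List Int) (k : Nat) : pvP a (k + 1) = pvP a k + a.getD k 0 := by
  simp [pvP, List.range_succ]

-- the first fold builds exactly the prefix-sum table
theorem pv_ps_build (a : List Int) (m : Nat) :
    (PySem.List.pyRange 0 (m : Int)).foldl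
      (fun (st : List Int × Int) j =>
        (st.1 ++ [st.2 + PySem.List.pyGetD a j 0], st.2 + PySem.List.pyGetD a j 0)) ([0], 0)
    = ((List.range (m + 1)).map (fun k => pvP a k), pvP a m) := by
  induction m with
  | zero => simp [PySem.List.pyRange, pvP]
  | succ m ih =>
      rw [show ((m + 1 : Nat) : Int) = (m : Int) + 1 by push_cast; ring,
          PySem.List.pyRange_one_succ_right (by exact_mod_cast Int.natCast_nonneg m),
          List.foldl_append, ih]
      simp [List.range_succ, PySem.List.pyGetD_natCast, pvP_succ]

-- reading the table at a cast index
theorem pv_ps_get (a : List Int) (m k : Nat) (hk : k ≤ m) :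
    ((List.range (m + 1)).map (fun k => pvP a k)).getD k 0 = pvP a k := by
  rw [List.getD_eq_getElem _ _ (by simpa using Nat.lt_succ_of_le hk)]
  simp

-- sum of (c - a_j) over j < k
theorem pv_sum_lt (a : List Int) (c : Int) (k : Nat) :
    ((List.range k).map (fun j => c - a.getD j 0)).sum = k * c - pvP a k := by
  induction k with
  | zero => simp [pvP]
  | succ k ih =>
      rw [List.range_succ]
      simp only [List.map_append, List.sum_append, ih, List.map_cons, List.map_nil,
        List.sum_cons, List.sum_nil, pvP_succ]
      push_cast; ring

-- the inner-loop sum, split at i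
theorem pv_inner (a : List Int) (i m : Nat) (him : i ≤ m) :
    ((List.range m).map (fun (j : Nat) => if (i : Int) ≤ (j : Int) then a.getD j 0 - a.getD i 0
                                  else a.getD i 0 - a.getD j 0)).sum
    = pvP a m - pvP a i - a.getD i 0 * ((m : Int) - i) + a.getD i 0 * i - pvP a i := by
  induction m with
  | zero =>
      obtain rfl := Nat.le_zero.mp him
      simp [pvP]
  | succ m ih =>
      rcases Nat.lt_or_ge i (m + 1) with h | h
      · have him' : i ≤ m := Nat.lt_succ_iff.mp h
        rw [List.range_succ]
        simp only [List.map_append, List.sum_append, ih him']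
        have hc : ((i : Int)) ≤ (m : Int) := by exact_mod_cast him'
        simp only [List.map_cons, List.map_nil, List.sum_cons, List.sum_nil, if_pos hc]
        rw [pvP_succ]; push_cast; ring
      · have : i = m + 1 := le_antisymm him h
        subst this
        have : ∀ (j : ℕ), j ∈ List.range (m + 1) →
            (if ((m + 1 : Nat) : Int) ≤ (j : Int) then a.getD j 0 - a.getD (m+1) 0
             else a.getD (m+1) 0 - a.getD j 0) = a.getD (m+1) 0 - a.getD j 0 := by
          intro j hj
          rw [if_neg]
          have := List.mem_range.mp hj
          push_cast; omega
        rw [List.map_congr_left this, pv_sum_lt]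
        push_cast; ring

theorem pv_main (n : Int) (a : List Int) : prefix2 n a = prefix2_alt n a := by
  rcases Int.lt_or_le n 0 with hn | hn
  · have h : PySem.List.pyRange 0 n = [] := by
      simp [PySem.List.pyRange]; omega
    simp [prefix2, prefix2_alt, h]
  · obtain ⟨m, rfl⟩ := Int.eq_ofNat_of_zero_le hn
    unfold prefix2 prefix2_alt
    rw [pv_ps_build]
    rw [PySem.List.foldl_append_singleton_eq_map, PySem.List.foldl_append_singleton_eq_map,
        PySem.List.pyRange_zero_natCast]
    simp only [List.map_map, List.nil_append]
    apply List.map_congr_left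
    intro i hi
    have him : i ≤ m := Nat.le_of_lt (List.mem_range.mp hi)
    simp only [Function.comp_def]
    rw [PySem.List.foldl_add, List.map_map]
    simp only [Function.comp_def, PySem.List.pyGetD_natCast, ge_iff_le]
    rw [pv_ps_get a m m le_rfl, pv_ps_get a m i him, pv_inner a i m him]
    ring

-- ===== VERDICT (by name: the statement is the Claim_ definition above) =====
theorem prefix2_spec : Claim_equal_prefix2 := by
  intro n a _ _
  show prefix2 n a = prefix2_alt n a
  exact pv_main n a
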